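-- pv_equiv track=rewrite | github.com/raja-taparia/data-contracts-and-governance | scripts/log_test_results.py | parse_test_unique_id
-- ===== SOURCE A (Python) =====
-- def parse_test_unique_id(unique_id: str) -> tuple:
--     """Parse test unique_id to extract model and column names
--
--     Examples:
--     - test.data_contracts_governance.not_null_dim_accounts_account_id
--     - test.data_contracts_governance.unique_dim_accounts_account_id
--     - test.data_contracts_governance.accepted_values_dim_accounts_account_type__CHECKING__SAVINGS
--     """
--     parts = unique_id.split('.')
--     if len(parts) < 3:
--         return None, None
--
--     test_full_name = parts[-1]
--
--     # Try to extract model_name and column_name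
--     # Most common patterns: test_name_model_name_column_name
--
--     # Split on double underscore first (for parameterized tests)
--     base_name = test_full_name.split('__')[0]
--
--     # List of common test prefixes
--     test_prefixes = [
--         'not_null_', 'unique_', 'accepted_values_', 'expression_is_true_',
--         'relationships_', 'dbt_utils_', 'equal_rowcount_', 'cardinality_equality_',
--         'mutually_exclusive_ranges_', 'not_accepted_values_', 'sequential_values_',
--         'at_least_one_', 'recency_', 'custom_'
--     ]
--
--     test_name = None
--     remainder = base_name
--
--     for prefix in test_prefixes:
--         if base_name.startswith(prefix):
--             test_name = prefix.rstrip('_')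
--             remainder = base_name[len(prefix):]
--             break
--
--     # If no prefix matched, try simple split
--     if not test_name:
--         parts_split = base_name.split('_', 1)
--         if len(parts_split) >= 2:
--             test_name = parts_split[0]
--             remainder = parts_split[1]
--
--     # remainder should be like: model_name_column_name
--     # Find where model_name ends (look for common pattern)
--     tokens = remainder.split('_')
--
--     # Try heuristic: first token is usually model, rest is column
--     model_name = tokens[0] if tokens else None
--     column_name = '_'.join(tokens[1:]) if len(tokens) > 1 else None
--
--     # Override with common patterns
--     # E.g., dim_accounts_account_id => model=dim_accounts, col=account_id
--     for i in range(1, len(tokens)):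
--         potential_model = '_'.join(tokens[:i])
--         potential_column = '_'.join(tokens[i:])
--
--         # Heuristic: if model looks like it has plural or "dim_" prefix
--         if potential_model.startswith('dim_') or potential_model.startswith('stg_'):
--             model_name = potential_model
--             column_name = potential_column
--             break
--
--     return model_name, column_name
-- ===== SOURCE B (Python) =====
-- TEST_PREFIXES = [
--     'not_null_', 'unique_', 'accepted_values_', 'expression_is_true_',
--     'relationships_', 'dbt_utils_', 'equal_rowcount_', 'cardinality_equality_',
--     'mutually_exclusive_ranges_', 'not_accepted_values_', 'sequential_values_',
--     'at_least_one_', 'recency_', 'custom_'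
-- ]
--
--
-- def parse_test_unique_id(unique_id: str) -> tuple:
--     parts = unique_id.split('.')
--     if len(parts) < 3:
--         return None, None
--
--     base = parts[-1].split('__')[0]
--
--     # remainder after the test-name prefix: first known prefix, else one '_' split
--     matched = next((p for p in TEST_PREFIXES if base.startswith(p)), None)
--     if matched is not None:
--         remainder = base[len(matched):]
--     else:
--         ps = base.split('_', 1)
--         remainder = ps[1] if len(ps) > 1 else base
--
--     tokens = remainder.split('_')
--
--     # dim_/stg_ models: closed-form branch instead of a boundary scan
--     if len(tokens) >= 3 and tokens[0] in ('dim', 'stg'):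
--         return tokens[0] + '_' + tokens[1], '_'.join(tokens[2:])
--
--     return (tokens[0] if tokens else None,
--             '_'.join(tokens[1:]) if len(tokens) > 1 else None)
-- ===== Notes on version B (the rewrite author's own statement) =====
-- stated objective: simpler
-- what changed: The stateful prefix loop becomes a first-match lookup (next over a generator) and the iterative model/column boundary-override scan is replaced by a direct closed-form branch: since underscore-split tokens contain no underscore, the scan can only fire at index 2 with the first token equal to dim or stg.
import Mathlib
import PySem

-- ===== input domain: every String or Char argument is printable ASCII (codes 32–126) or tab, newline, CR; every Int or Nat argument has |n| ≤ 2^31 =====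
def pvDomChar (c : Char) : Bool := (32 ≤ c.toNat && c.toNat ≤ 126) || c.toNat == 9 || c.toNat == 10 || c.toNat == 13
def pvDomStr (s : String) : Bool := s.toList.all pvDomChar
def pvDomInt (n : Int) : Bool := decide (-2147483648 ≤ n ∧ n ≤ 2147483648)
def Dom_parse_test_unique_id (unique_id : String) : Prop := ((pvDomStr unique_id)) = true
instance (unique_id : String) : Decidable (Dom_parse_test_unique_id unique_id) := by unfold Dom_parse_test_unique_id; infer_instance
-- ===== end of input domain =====

-- B replaces A's stateful prefix loop by a first-match lookup and A's model/column
-- boundary-override scan by a closed-form dim/stg branch (objective: simpler).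

-- ===== PORT A =====

-- the module-level prefix list (shared verbatim by both Pythons)
def pvTestPrefixes : List (List Char) :=
  ["not_null_".toList, "unique_".toList, "accepted_values_".toList, "expression_is_true_".toList,
   "relationships_".toList, "dbt_utils_".toList, "equal_rowcount_".toList, "cardinality_equality_".toList,
   "mutually_exclusive_ranges_".toList, "not_accepted_values_".toList, "sequential_values_".toList,
   "at_least_one_".toList, "recency_".toList, "custom_".toList]

-- prefix.rstrip('_') ported by hand (exact): drop the trailing run of '_'
def pvRstripU (p : List Char) : List Char := (p.reverse.dropWhile (· == '_')).reverse

-- A's `for prefix in test_prefixes: if base_name.startswith(prefix): …; break`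
-- state: (test_name, remainder); base[len(prefix):] is drop (len ≥ 0)
def pvPrefixLoopA : List (List Char) → List Char → Option (List Char) × List Char
  | [], base => (none, base)
  | p :: ps, base =>
      if PySem.Chars.startswith base p then (some (pvRstripU p), base.drop p.length)
      else pvPrefixLoopA ps base

-- A's `for i in range(1, len(tokens)): …; break` — i ≥ 0 so tokens[:i]/tokens[i:] are take/drop
def pvOverrideLoopA (tokens : List (List Char)) :
    List Nat → Option (List Char) × Option (List Char) → Option (List Char) × Option (List Char)
  | [], mc => mc
  | i :: is, mc =>
      let pm := PySem.Chars.join ['_'] (tokens.take i)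
      let pc := PySem.Chars.join ['_'] (tokens.drop i)
      if PySem.Chars.startswith pm "dim_".toList || PySem.Chars.startswith pm "stg_".toList then
        (some pm, some pc)
      else pvOverrideLoopA tokens is mc

def parse_test_unique_id (unique_id : String) : Option String × Option String :=
  let parts := PySem.Chars.splitOn unique_id.toList ['.']
  if parts.length < 3 then (none, none)
  else
    let test_full_name := parts.getLastD []                       -- parts[-1]; parts ≠ [] here
    let base := (PySem.Chars.splitOn test_full_name ['_', '_']).headD []   -- split('__')[0]; split ≠ []
    let tr := pvPrefixLoopA pvTestPrefixes base
    let test_name := tr.1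
    let remainder0 := tr.2
    -- `if not test_name:` — None or '' is falsy
    let remainder :=
      if (match test_name with | none => true | some t => t.isEmpty) then
        let ps := PySem.Chars.splitOnMax base ['_'] 1
        if 2 ≤ ps.length then ps.getD 1 [] else remainder0
      else remainder0
    let tokens := PySem.Chars.splitOn remainder ['_']
    let model0 : Option (List Char) := match tokens with | [] => none | t :: _ => some t
    let col0 : Option (List Char) :=
      if 1 < tokens.length then some (PySem.Chars.join ['_'] (tokens.drop 1)) else none
    let mc := pvOverrideLoopA tokens (List.range' 1 (tokens.length - 1)) (model0, col0)
    (mc.1.map String.ofList, mc.2.map String.ofList)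

-- ===== PORT B =====

def parse_test_unique_id_alt (unique_id : String) : Option String × Option String :=
  let parts := PySem.Chars.splitOn unique_id.toList ['.']
  if parts.length < 3 then (none, none)
  else
    let base := (PySem.Chars.splitOn (parts.getLastD []) ['_', '_']).headD []
    -- next((p for p in TEST_PREFIXES if base.startswith(p)), None)
    let remainder :=
      match pvTestPrefixes.find? (fun p => PySem.Chars.startswith base p) with
      | some p => base.drop p.length
      | none =>
          let ps := PySem.Chars.splitOnMax base ['_'] 1
          if 1 < ps.length then ps.getD 1 [] else base
    let tokens := PySem.Chars.splitOn remainder ['_']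
    if 3 ≤ tokens.length ∧ (tokens.headD [] = "dim".toList ∨ tokens.headD [] = "stg".toList) then
      (some (String.ofList (tokens.headD [] ++ '_' :: tokens.getD 1 [])),
       some (String.ofList (PySem.Chars.join ['_'] (tokens.drop 2))))
    else
      ((match tokens with | [] => none | t :: _ => some t).map String.ofList,
       (if 1 < tokens.length then some (PySem.Chars.join ['_'] (tokens.drop 1)) else none).map String.ofList)

-- ===== PRECONDITION & SPEC =====
def Spec_parse_test_unique_id (unique_id : String) (out : Option String × Option String) : Prop := out = parse_test_unique_id_alt unique_id
instance (unique_id : String) (out : Option String × Option String) : Decidable (Spec_parse_test_unique_id unique_id out) := by unfold Spec_parse_test_unique_id; infer_instance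

-- ===== CLAIM (what is proved, stated in full; the proofs are below) =====
def Claim_equal_parse_test_unique_id : Prop := ∀ (unique_id : String), Dom_parse_test_unique_id unique_id → Spec_parse_test_unique_id unique_id (parse_test_unique_id unique_id)

-- ===== LEMMAS AND PROOFS =====

theorem pv_go_no_sep (c : Char) : ∀ (fuel : Nat) (l cur : List Char) (acc : List (List Char)),
    l.length < fuel → c ∉ cur → (∀ t ∈ acc, c ∉ t) →
    ∀ t ∈ PySem.Chars.splitOn.go [c] fuel l cur acc, c ∉ t := by
  intro fuel
  induction fuel with
  | zero => intro l cur acc h; omega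
  | succ n ih =>
    intro l cur acc hlen hcur hacc t ht
    cases l with
    | nil =>
      rw [PySem.Chars.splitOn.go.eq_def] at ht
      simp at ht
      rcases ht with h | h
      · exact hacc _ h
      · subst h; simpa using hcur
    | cons x rest =>
      rw [PySem.Chars.splitOn.go.eq_def] at ht
      simp only [List.isPrefixOf] at ht
      by_cases hx : c = x
      · subst hx
        simp at ht
        refine ih rest [] (cur.reverse :: acc) (by simpa using Nat.lt_of_succ_lt_succ hlen) (by simp) ?_ t ht
        intro u hu
        rcases List.mem_cons.mp hu with rfl | hu
        · simpa using hcur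
        · exact hacc _ hu
      · simp [hx] at ht
        refine ih rest (x :: cur) acc (by simpa using Nat.lt_of_succ_lt_succ hlen) ?_ hacc t ht
        intro hmem
        rcases List.mem_cons.mp hmem with rfl | hmem
        · exact hx rfl
        · exact hcur hmem

theorem pv_splitOn_no_sep (c : Char) (s : List Char) :
    ∀ t ∈ PySem.Chars.splitOn s [c], c ∉ t := by
  have := pv_go_no_sep c (s.length + 1) s [] [] (by omega) (by simp) (by simp)
  simpa [PySem.Chars.splitOn] using this

theorem pv_startswith_token_false (t0 : List Char) (h : '_' ∉ t0) (a b c : Char) :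
    PySem.Chars.startswith t0 [a, b, c, '_'] = false := by
  by_contra hne
  have hs : PySem.Chars.startswith t0 [a, b, c, '_'] = true := by
    cases hx : PySem.Chars.startswith t0 [a, b, c, '_'] <;> simp_all
  have hp := (PySem.Chars.startswith_iff _ _).mp hs
  exact h (hp.subset (by simp))

theorem pv_prefix_iff (t0 rest : List Char) (h : '_' ∉ t0)
    (a b c : Char) (ha : a ≠ '_') (hb : b ≠ '_') (hc : c ≠ '_') :
    ([a, b, c, '_'] <+: (t0 ++ '_' :: rest)) ↔ t0 = [a, b, c] := by
  constructor
  · intro hp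
    match t0, h with
    | [], _ => simp [List.cons_prefix_cons] at hp; exact absurd hp.1 ha
    | [x], h => simp [List.cons_prefix_cons] at hp; exact absurd hp.2.1 hb
    | [x, y], h => simp [List.cons_prefix_cons] at hp; exact absurd hp.2.2.1 hc
    | x :: y :: z :: t', h =>
      simp only [List.cons_append, List.cons_prefix_cons] at hp
      obtain ⟨hax, hby, hcz, hp⟩ := hp
      cases t' with
      | nil => simp [← hax, ← hby, ← hcz]
      | cons u t'' =>
        rw [List.cons_append, List.cons_prefix_cons] at hp
        simp at h
        exact absurd hp.1.symm (by tauto)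
  · rintro rfl; simp [List.cons_prefix_cons]

theorem pv_loopA_all_false (tokens : List (List Char)) (mc : Option (List Char) × Option (List Char)) :
    ∀ is : List Nat,
      (∀ i ∈ is, (PySem.Chars.startswith (PySem.Chars.join ['_'] (tokens.take i)) "dim_".toList
        || PySem.Chars.startswith (PySem.Chars.join ['_'] (tokens.take i)) "stg_".toList) = false) →
      pvOverrideLoopA tokens is mc = mc := by
  intro is
  induction is with
  | nil => intro _; rfl
  | cons i is ih =>
    intro hall
    have hi := hall i (by simp)
    simp only [pvOverrideLoopA, hi]
    simp only [Bool.false_eq_true, if_false]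
    exact ih (fun j hj => hall j (by simp [hj]))

-- startswith (t0 ++ '_' :: r) "dim_" as a decidable equality, for '_'-free t0
theorem pv_cond_iff (t0 r : List Char) (h : '_' ∉ t0) (a b c : Char)
    (ha : a ≠ '_') (hb : b ≠ '_') (hc : c ≠ '_') :
    PySem.Chars.startswith (t0 ++ '_' :: r) [a, b, c, '_'] = decide (t0 = [a, b, c]) := by
  by_cases he : t0 = [a, b, c]
  · subst he
    simp [PySem.Chars.startswith_iff, List.cons_prefix_cons]
  · simp only [he, decide_false]
    cases hx : PySem.Chars.startswith (t0 ++ '_' :: r) [a, b, c, '_']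
    · rfl
    · exact absurd ((pv_prefix_iff t0 r h a b c ha hb hc).mp ((PySem.Chars.startswith_iff _ _).mp hx)) he

theorem hdim : "dim_".toList = ['d','i','m','_'] := by decide
theorem hstg : "stg_".toList = ['s','t','g','_'] := by decide

theorem pv_loopA_closed (tokens : List (List Char)) (H : ∀ t ∈ tokens, '_' ∉ t)
    (mc : Option (List Char) × Option (List Char)) :
    pvOverrideLoopA tokens (List.range' 1 (tokens.length - 1)) mc =
      match tokens with
      | t0 :: t1 :: t2 :: rest =>
          if t0 = "dim".toList ∨ t0 = "stg".toList then
            (some (t0 ++ '_' :: t1), some (PySem.Chars.join ['_'] (t2 :: rest)))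
          else mc
      | _ => mc := by
  match tokens, H with
  | [], _ => rfl
  | [t0], _ => rfl
  | [t0, t1], H =>
    have h0 : '_' ∉ t0 := H t0 (by simp)
    show pvOverrideLoopA [t0, t1] [1] mc = mc
    rw [pvOverrideLoopA]
    simp only [List.take, PySem.Chars.join_singleton, hdim, hstg,
      pv_startswith_token_false t0 h0, Bool.or_self, Bool.false_eq_true, if_false]
    rfl
  | t0 :: t1 :: t2 :: rest, H =>
    have h0 : '_' ∉ t0 := H t0 (by simp)
    rw [show (t0 :: t1 :: t2 :: rest).length - 1 = rest.length + 1 + 1 by simp,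
        List.range'_succ, List.range'_succ]
    rw [pvOverrideLoopA]
    simp only [List.take, PySem.Chars.join_singleton, hdim, hstg,
      pv_startswith_token_false t0 h0, Bool.or_self, Bool.false_eq_true, if_false]
    rw [pvOverrideLoopA]
    simp only [List.take, List.drop]
    rw [show (PySem.Chars.join ['_'] [t0, t1]) = t0 ++ '_' :: t1 by
      rw [PySem.Chars.join_cons_cons, PySem.Chars.join_singleton, List.append_assoc]; rfl]
    rw [hdim, hstg, pv_cond_iff t0 t1 h0 'd' 'i' 'm' (by decide) (by decide) (by decide),
        pv_cond_iff t0 t1 h0 's' 't' 'g' (by decide) (by decide) (by decide)]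
    by_cases hd : t0 = "dim".toList ∨ t0 = "stg".toList
    · have : (decide (t0 = ['d','i','m']) || decide (t0 = ['s','t','g'])) = true := by
        rcases hd with h | h <;> simp [h]
      rw [this]
      simp only [if_true]
      exact (if_pos hd).symm
    · have hcond : (decide (t0 = ['d','i','m']) || decide (t0 = ['s','t','g'])) = false := by
        rw [not_or] at hd
        obtain hd := hd
        simp [show t0 ≠ ['d','i','m'] from by simpa using hd.1,
              show t0 ≠ ['s','t','g'] from by simpa using hd.2]
      rw [hcond]
      simp only [Bool.false_eq_true, if_false]
      rw [pv_loopA_all_false]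
      · exact (if_neg hd).symm
      · intro i hi
        rw [List.mem_range'_1] at hi
        obtain ⟨j, rfl⟩ : ∃ j, i = j + 3 := ⟨i - 3, by omega⟩
        have htk : (t0 :: t1 :: t2 :: rest).take (j + 3) =
            t0 :: t1 :: t2 :: rest.take j := by simp [List.take_succ_cons]
        rw [htk, PySem.Chars.join_cons_cons, List.append_assoc, List.singleton_append,
            hdim, hstg,
            pv_cond_iff t0 _ h0 'd' 'i' 'm' (by decide) (by decide) (by decide),
            pv_cond_iff t0 _ h0 's' 't' 'g' (by decide) (by decide) (by decide)]
        exact hcond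


theorem pv_prefix_phase (base : List Char) : ∀ ps : List (List Char),
    pvPrefixLoopA ps base =
      match ps.find? (fun p => PySem.Chars.startswith base p) with
      | some p => (some (pvRstripU p), base.drop p.length)
      | none => (none, base) := by
  intro ps
  induction ps with
  | nil => rfl
  | cons p ps ih =>
    rw [pvPrefixLoopA, List.find?_cons]
    cases hs : PySem.Chars.startswith base p
    · simp [ih]
    · simp

theorem pv_prefixes_nonempty : ∀ p ∈ pvTestPrefixes, (pvRstripU p).isEmpty = false := by decide

-- the part of both ports downstream of base: A's remainder equals B's remainder
theorem pv_remainder_eq (base : List Char) :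
    (if (match (pvPrefixLoopA pvTestPrefixes base).1 with
          | none => true | some t => t.isEmpty) = true then
       (if 2 ≤ (PySem.Chars.splitOnMax base ['_'] 1).length then
          (PySem.Chars.splitOnMax base ['_'] 1).getD 1 []
        else (pvPrefixLoopA pvTestPrefixes base).2)
     else (pvPrefixLoopA pvTestPrefixes base).2)
    = (match pvTestPrefixes.find? (fun p => PySem.Chars.startswith base p) with
       | some p => base.drop p.length
       | none =>
           if 1 < (PySem.Chars.splitOnMax base ['_'] 1).length then
             (PySem.Chars.splitOnMax base ['_'] 1).getD 1 []
           else base) := by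
  rw [pv_prefix_phase]
  cases hf : pvTestPrefixes.find? (fun p => PySem.Chars.startswith base p) with
  | none => simp [Nat.lt_iff_add_one_le]
  | some p =>
    have hne := pv_prefixes_nonempty p (List.mem_of_find?_eq_some hf)
    simp [hne]


-- both ports downstream of remainder: A's override loop vs B's closed-form branch
theorem pv_down (tokens : List (List Char)) : (∀ t ∈ tokens, '_' ∉ t) →
    (((pvOverrideLoopA tokens (List.range' 1 (tokens.length - 1))
        ((match tokens with | [] => none | t :: _ => some t),
         (if 1 < tokens.length then some (PySem.Chars.join ['_'] (tokens.drop 1)) else none)))).1.map String.ofList,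
     ((pvOverrideLoopA tokens (List.range' 1 (tokens.length - 1))
        ((match tokens with | [] => none | t :: _ => some t),
         (if 1 < tokens.length then some (PySem.Chars.join ['_'] (tokens.drop 1)) else none)))).2.map String.ofList)
    = (if 3 ≤ tokens.length ∧ (tokens.headD [] = "dim".toList ∨ tokens.headD [] = "stg".toList) then
         (some (String.ofList (tokens.headD [] ++ '_' :: tokens.getD 1 [])),
          some (String.ofList (PySem.Chars.join ['_'] (tokens.drop 2))))
       else
         ((match tokens with | [] => none | t :: _ => some t).map String.ofList,
          (if 1 < tokens.length then some (PySem.Chars.join ['_'] (tokens.drop 1)) else none).map String.ofList)) := by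
  intro H
  rw [pv_loopA_closed tokens H]
  match tokens with
  | [] => simp
  | [t0] => simp
  | [t0, t1] => simp
  | t0 :: t1 :: t2 :: rest =>
    by_cases hd : t0 = ['d', 'i', 'm'] ∨ t0 = ['s', 't', 'g']
    · simp [hd]
    · simp [hd]

-- ===== VERDICT (by name: the statement is the Claim_ definition above) =====
theorem parse_test_unique_id_spec : Claim_equal_parse_test_unique_id := by
  intro u _
  show parse_test_unique_id u = parse_test_unique_id_alt u
  unfold parse_test_unique_id parse_test_unique_id_alt
  by_cases hp : (PySem.Chars.splitOn u.toList ['.']).length < 3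
  · simp [hp]
  · simp only [if_neg hp]
    rw [pv_remainder_eq]
    exact pv_down _ (pv_splitOn_no_sep '_' _)
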